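-- pv_equiv track=rewrite | github.com/gzavlanis/myFirstProject | excercises_1.py | ProductDigits
-- ===== SOURCE A (Python) =====
-- def ProductDigits(num):
--     if num < 10:
--         return 2
--     min_v = len(str(num)) + 1
--     for i in range(1, num + 1):
--         for j in range(1, num + 1):
--             if i * j == num:
--                 v = len(str(i) + str(j))
--                 if min_v > v:
--                     min_v = v
--     return min_v
-- ===== SOURCE B (Python) =====
-- def ProductDigits(num):
--     if num < 10:
--         return 2
--     best = 1 + len(str(num))
--     d = 2
--     while d * d <= num:
--         if num % d == 0:
--             best = min(best, len(str(d)) + len(str(num // d)))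
--         d += 1
--     return best
-- ===== Notes on version B (the rewrite author's own statement) =====
-- stated objective: faster
-- what changed: Replaces A's O(num^2) double scan over all (i,j) pairs with a single trial-division loop over d with d*d <= num, reading each factor pair as (d, num//d).
import Mathlib
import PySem

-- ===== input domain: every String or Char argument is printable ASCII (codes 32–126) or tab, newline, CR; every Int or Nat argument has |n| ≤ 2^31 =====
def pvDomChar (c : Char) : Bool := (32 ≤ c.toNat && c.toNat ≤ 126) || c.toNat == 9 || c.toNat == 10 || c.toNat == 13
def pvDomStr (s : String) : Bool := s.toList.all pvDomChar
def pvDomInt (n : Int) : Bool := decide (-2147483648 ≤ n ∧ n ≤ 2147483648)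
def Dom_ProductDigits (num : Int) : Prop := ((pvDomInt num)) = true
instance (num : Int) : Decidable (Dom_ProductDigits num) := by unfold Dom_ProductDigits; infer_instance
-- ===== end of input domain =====

-- B replaces A's O(num^2) double scan over all (i,j) pairs by a single trial-division
-- loop over d with d*d <= num, reading each factor pair as (d, num // d)  (objective: faster).


-- ===== PORT A =====
def ProductDigits (num : Int) : Int :=
  if num < 10 then 2
  else
    (PySem.List.pyRange 1 (num + 1) 1).foldl (fun min_v i =>
      (PySem.List.pyRange 1 (num + 1) 1).foldl (fun min_v j =>
        if i * j == num then
          let v := PySem.Str.len (PySem.Int.toStr i ++ PySem.Int.toStr j)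
          if min_v > v then v else min_v
        else min_v) min_v)
      (PySem.Str.len (PySem.Int.toStr num) + 1)

-- ===== PORT B =====
-- the 'while d * d <= num' loop of Source B
def pdLoop (num best d : Int) : Int :=
  if h : d * d ≤ num then
    pdLoop num
      (if PySem.Int.mod num d == 0 then
        min best (PySem.Str.len (PySem.Int.toStr d) +
                  PySem.Str.len (PySem.Int.toStr (PySem.Int.floordiv num d)))
       else best)
      (d + 1)
  else best
termination_by (num + 1 - d).toNat
decreasing_by
  have h1 : d ≤ d * d := by nlinarith [mul_self_nonneg (d - 1)]
  omega

def ProductDigits_alt (num : Int) : Int :=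
  if num < 10 then 2
  else pdLoop num (1 + PySem.Str.len (PySem.Int.toStr num)) 2

-- ===== PRECONDITION & SPEC =====
def Spec_ProductDigits (num : Int) (out : Int) : Prop := out = ProductDigits_alt num
instance (num : Int) (out : Int) : Decidable (Spec_ProductDigits num out) := by unfold Spec_ProductDigits; infer_instance

-- ===== CLAIM (what is proved, stated in full; the proofs are below) =====
def Claim_equal_ProductDigits : Prop := ∀ (num : Int), Dom_ProductDigits num → Spec_ProductDigits num (ProductDigits num)

-- ===== LEMMAS AND PROOFS =====

-- digit length of x, as both programs compute it
def pdL (x : Int) : Int := PySem.Str.len (PySem.Int.toStr x)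

-- value contributed by divisor e of num
def pdF (num e : Int) : Int := pdL e + pdL (PySem.Int.floordiv num e)

-- one min-update step, shared shape of both loops
def pdG (num b e : Int) : Int := if PySem.Int.mod num e == 0 then min b (pdF num e) else b

-- the integer square-root bound of B's loop
def pdK (num : Int) : Int := (Nat.sqrt num.toNat : Int)

-- contributed values of the divisors in l
def pdC (num : Int) (l : List Int) : List Int :=
  (l.filter (fun e => PySem.Int.mod num e == 0)).map (pdF num)

-- A's inner fold is the identity on a stretch with no solution of i*j = num
theorem pd_inner_noop (num i : Int) (l : List Int) (mv : Int) (h : ∀ j ∈ l, ¬ i * j = num) :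
    l.foldl (fun min_v j =>
        if i * j == num then
          let v := PySem.Str.len (PySem.Int.toStr i ++ PySem.Int.toStr j)
          if min_v > v then v else min_v
        else min_v) mv = mv := by
  induction l generalizing mv with
  | nil => rfl
  | cons x t ih =>
    rw [List.foldl_cons, if_neg (by simpa using h x List.mem_cons_self)]
    exact ih _ (fun j hj => h j (List.mem_cons_of_mem _ hj))

-- A's inner loop over j equals one pdG step
theorem pd_inner (num i mv : Int) (hnum : 10 ≤ num) (hi1 : 1 ≤ i) (hi2 : i ≤ num) :
    (PySem.List.pyRange 1 (num + 1) 1).foldl (fun min_v j =>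
        if i * j == num then
          let v := PySem.Str.len (PySem.Int.toStr i ++ PySem.Int.toStr j)
          if min_v > v then v else min_v
        else min_v) mv = pdG num mv i := by
  by_cases hdvd : PySem.Int.mod num i = 0
  · have hdvd' : i ∣ num := (PySem.Int.mod_eq_zero_iff_dvd num i).mp hdvd
    have hipos : 0 < i := by omega
    have hij0 : i * (num / i) = num := Int.mul_ediv_cancel' hdvd'
    set j0 := num / i with hj0
    have hj01 : 1 ≤ j0 := by
      rw [hj0, Int.le_ediv_iff_mul_le hipos]; omega
    have hj0n : j0 ≤ num := Int.ediv_le_self i (by omega)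
    have hseg1 : ∀ j ∈ PySem.List.pyRange 1 j0 1, ¬ i * j = num := by
      intro j hj heq
      rw [PySem.List.mem_pyRange_one] at hj
      have := mul_lt_mul_of_pos_left hj.2 hipos
      omega
    have hseg3 : ∀ j ∈ PySem.List.pyRange (j0 + 1) (num + 1) 1, ¬ i * j = num := by
      intro j hj heq
      rw [PySem.List.mem_pyRange_one] at hj
      have h2 : j0 < j := by omega
      have := mul_lt_mul_of_pos_left h2 hipos
      omega
    have hfd : PySem.Int.floordiv num i = j0 := PySem.Int.floordiv_eq_ediv_of_pos hipos
    rw [PySem.List.pyRange_one_append 1 j0 (num + 1) (by omega) (by omega), List.foldl_append,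
        pd_inner_noop num i _ mv hseg1,
        PySem.List.pyRange_one_cons (by omega), List.foldl_cons,
        pd_inner_noop num i _ _ hseg3]
    show (if i * j0 == num then
            let v := PySem.Str.len (PySem.Int.toStr i ++ PySem.Int.toStr j0)
            if mv > v then v else mv
          else mv) = pdG num mv i
    rw [if_pos (by simp [hij0])]
    show (if mv > PySem.Str.len (PySem.Int.toStr i ++ PySem.Int.toStr j0) then
            PySem.Str.len (PySem.Int.toStr i ++ PySem.Int.toStr j0) else mv) = pdG num mv i
    rw [pdG, if_pos (show (PySem.Int.mod num i == 0) = true by simp [hdvd])]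
    simp only [pdF, pdL, hfd, PySem.Str.len_eq, String.toList_append, List.length_append]
    rw [min_def]
    split_ifs <;> omega
  · rw [pd_inner_noop num i _ mv ?_, pdG, if_neg (by simpa using hdvd)]
    intro j hj heq
    exact hdvd ((PySem.Int.mod_eq_zero_iff_dvd num i).mpr ⟨j, heq.symm⟩)

-- A's outer fold as a fold of pdG steps
theorem pd_A_outer (num : Int) (hnum : 10 ≤ num) :
    ProductDigits num =
      (PySem.List.pyRange 1 (num + 1) 1).foldl (pdG num) (pdL num + 1) := by
  rw [ProductDigits, if_neg (by omega)]
  refine PySem.List.foldl_congr_mem _ _ _ _ ?_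
  intro acc i hi
  rw [PySem.List.mem_pyRange_one] at hi
  exact pd_inner num i acc hnum (by omega) (by omega)

-- e*e ≤ num says exactly that e is below B's square-root bound
theorem pd_sqrt_iff (num e : Int) (hnum : 0 ≤ num) (he : 0 ≤ e) :
    e * e ≤ num ↔ e ≤ pdK num := by
  have he' : (e.toNat : Int) = e := Int.toNat_of_nonneg he
  have hn' : (num.toNat : Int) = num := Int.toNat_of_nonneg hnum
  unfold pdK
  constructor
  · intro hee
    have h2 : (e.toNat : Int) * e.toNat ≤ (num.toNat : Int) := by rw [he', hn']; exact hee
    have h3 : e.toNat ≤ Nat.sqrt num.toNat := Nat.le_sqrt.mpr (by exact_mod_cast h2)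
    omega
  · intro hle
    have h2 : e.toNat ≤ Nat.sqrt num.toNat := by omega
    have h3 : e.toNat * e.toNat ≤ num.toNat := Nat.le_sqrt.mp h2
    have h4 : ((e.toNat * e.toNat : Nat) : Int) ≤ ((num.toNat : Nat) : Int) := by exact_mod_cast h3
    push_cast at h4
    rw [he', hn'] at h4
    exact h4

-- B's loop as a fold of pdG steps over [d, K]
theorem pd_B_loop (num : Int) (hnum : 10 ≤ num) (d b : Int) (hd : 0 ≤ d) :
    pdLoop num b d = (PySem.List.pyRange d (pdK num + 1) 1).foldl (pdG num) b := by
  have hK : ∀ e : Int, 0 ≤ e → (e * e ≤ num ↔ e ≤ pdK num) :=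
    fun e he => pd_sqrt_iff num e (by omega) he
  revert d b hd
  suffices H : ∀ (n : Nat) (d b : Int), 0 ≤ d → (pdK num + 1 - d).toNat ≤ n →
      pdLoop num b d = (PySem.List.pyRange d (pdK num + 1) 1).foldl (pdG num) b by
    intro d b hd
    exact H (pdK num + 1 - d).toNat d b hd le_rfl
  intro n
  induction n with
  | zero =>
    intro d b hd hle
    have hnd : ¬ d * d ≤ num := by
      intro hdd
      have := (hK d hd).mp hdd
      omega
    rw [pdLoop, dif_neg hnd, PySem.List.pyRange_one_eq_nil (by
      have : ¬ d ≤ pdK num := fun h2 => hnd ((hK d hd).mpr h2)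
      omega), List.foldl_nil]
  | succ n ih =>
    intro d b hd hle
    by_cases hdd : d * d ≤ num
    · have hdK : d ≤ pdK num := (hK d hd).mp hdd
      rw [pdLoop, dif_pos hdd, PySem.List.pyRange_one_cons (by omega), List.foldl_cons]
      exact ih (d + 1) _ (by omega) (by omega)
    · have : ¬ d ≤ pdK num := fun h2 => hdd ((hK d hd).mpr h2)
      rw [pdLoop, dif_neg hdd, PySem.List.pyRange_one_eq_nil (by omega), List.foldl_nil]

-- a pdG fold is a min fold over the contributed values
theorem pd_fold_contrib (num : Int) (l : List Int) (b : Int) :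
    l.foldl (pdG num) b = (pdC num l).foldl min b := by
  induction l generalizing b with
  | nil => rfl
  | cons x t ih =>
    by_cases hx : (PySem.Int.mod num x == 0) = true <;>
      simp [pdC, pdG, hx, ih]

-- min? only depends on membership
theorem pd_min?_congr (l1 l2 : List Int) (h : ∀ x, x ∈ l1 ↔ x ∈ l2) :
    l1.min? = l2.min? := by
  cases h1 : l1.min? with
  | none =>
    rw [List.min?_eq_none_iff] at h1; subst h1
    cases h2 : l2.min? with
    | none => rfl
    | some m => exfalso; exact (List.not_mem_nil (a := m)) ((h m).mpr (List.min?_mem h2))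
  | some m =>
    rw [List.min?_eq_some_iff] at h1
    symm; rw [List.min?_eq_some_iff]
    exact ⟨(h m).mp h1.1, fun b hb => h1.2 b ((h b).mpr hb)⟩

-- min folds from the same start over member-equal lists agree
theorem pd_foldl_min_congr (b : Int) (l1 l2 : List Int) (h : ∀ x, x ∈ b :: l1 ↔ x ∈ b :: l2) :
    l1.foldl min b = l2.foldl min b := by
  have := pd_min?_congr (b :: l1) (b :: l2) h
  rw [List.min?_cons', List.min?_cons'] at this
  exact Option.some.inj this

-- the contributed-value sets of [1..num] and [2..K] coincide up to the head value pdL num + 1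
theorem pd_values (num : Int) (hnum : 10 ≤ num) (x : Int) :
    x ∈ (pdL num + 1) :: pdC num (PySem.List.pyRange 1 (num + 1) 1) ↔
    x ∈ (pdL num + 1) :: pdC num (PySem.List.pyRange 2 (pdK num + 1) 1) := by
  have hK0 : 0 ≤ pdK num := by unfold pdK; exact Int.natCast_nonneg _
  have hKnum : pdK num ≤ num := by
    have := (pd_sqrt_iff num (pdK num) (by omega) hK0).mpr le_rfl
    nlinarith
  have hL1 : pdL 1 = 1 := by decide
  simp only [List.mem_cons, pdC, List.mem_map, List.mem_filter, PySem.List.mem_pyRange_one]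
  constructor
  · rintro (hx | ⟨e, ⟨⟨he1, he2⟩, hmod⟩, hfe⟩)
    · exact Or.inl hx
    · have hmod' : PySem.Int.mod num e = 0 := by simpa using hmod
      have hdvd : e ∣ num := (PySem.Int.mod_eq_zero_iff_dvd num e).mp hmod'
      have hepos : 0 < e := by omega
      have hfl : PySem.Int.floordiv num e = num / e := PySem.Int.floordiv_eq_ediv_of_pos hepos
      have hec : e * (num / e) = num := Int.mul_ediv_cancel' hdvd
      by_cases heK : e ≤ pdK num
      · by_cases he1' : e = 1
        · left
          subst he1'
          rw [← hfe]
          unfold pdF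
          rw [hfl, Int.ediv_one]
          omega
        · exact Or.inr ⟨e, ⟨⟨by omega, by omega⟩, hmod⟩, hfe⟩
      · obtain ⟨c, hcdef⟩ : ∃ c, num / e = c := ⟨_, rfl⟩
        rw [hcdef] at hec hfl
        have hcpos : 1 ≤ c := by rw [← hcdef, Int.le_ediv_iff_mul_le hepos]; omega
        have hcK : c ≤ pdK num := by
          by_contra hc
          have h3 : (pdK num + 1) * (pdK num + 1) ≤ e * c :=
            mul_le_mul (by omega) (by omega) (by omega) (by omega)
          have h4 : ¬ (pdK num + 1) * (pdK num + 1) ≤ num := by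
            intro hcon
            have := (pd_sqrt_iff num (pdK num + 1) (by omega) (by omega)).mp hcon
            omega
          omega
        by_cases hc1 : c = 1
        · left
          have he : e = num := by rw [hc1, mul_one] at hec; omega
          rw [← hfe]
          unfold pdF
          rw [hfl, hc1, hL1, he]
        · right
          have hcdvd : PySem.Int.mod num c = 0 :=
            (PySem.Int.mod_eq_zero_iff_dvd num c).mpr ⟨e, by rw [← hec]; ring⟩
          refine ⟨c, ⟨⟨by omega, by omega⟩, by simpa using hcdvd⟩, ?_⟩
          have hnc : num / c = e := by
            rw [← hec]
            exact Int.mul_ediv_cancel e (by omega)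
          rw [← hfe]
          unfold pdF
          rw [hfl, PySem.Int.floordiv_eq_ediv_of_pos (by omega : (0:Int) < c), hnc]
          omega
  · rintro (hx | ⟨e, ⟨⟨he1, he2⟩, hmod⟩, hfe⟩)
    · exact Or.inl hx
    · exact Or.inr ⟨e, ⟨⟨by omega, by omega⟩, hmod⟩, hfe⟩

-- ===== VERDICT (by name: the statement is the Claim_ definition above) =====
theorem ProductDigits_spec : Claim_equal_ProductDigits := by
  intro num _
  unfold Spec_ProductDigits
  by_cases h : num < 10
  · simp [ProductDigits, ProductDigits_alt, h]
  · have hnum : 10 ≤ num := by omega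
    rw [pd_A_outer num hnum]
    have hB : ProductDigits_alt num =
        (PySem.List.pyRange 2 (pdK num + 1) 1).foldl (pdG num) (pdL num + 1) := by
      rw [ProductDigits_alt, if_neg h, pd_B_loop num hnum 2 _ (by omega)]
      congr 1
      simp [pdL]; omega
    rw [hB, pd_fold_contrib, pd_fold_contrib]
    exact pd_foldl_min_congr _ _ _ (pd_values num hnum)
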